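-- pv_equiv track=rewrite | github.com/chrismerrill1974/astrobiology_research | shared/dimensional_opening/stoichiometry.py | _parse_species_term
-- ===== SOURCE A (Python) =====
-- from typing import Optional, List, Tuple
--
-- def _parse_species_term(term: str) -> Optional[Tuple[int, str]]:
--     """
--     Parse a term like "2A" or "B" into (coefficient, species_name).
--
--     Returns None for empty terms.
--
--     Raises
--     ------
--     ValueError
--         If coefficient is not a positive integer, or species name is malformed.
--     """
--     term = term.strip()
--     if not term:
--         return None
--
--     # Check for decimal point anywhere (non-integer coefficient)
--     if '.' in term:
--         # Check if it's in a coefficient position (before species name)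
--         first_alpha = next((i for i, c in enumerate(term) if c.isalpha()), len(term))
--         if '.' in term[:first_alpha]:
--             raise ValueError(
--                 f"Non-integer coefficient not supported: '{term}'. "
--                 f"Use integer stoichiometric coefficients only."
--             )
--
--     # Find where the coefficient ends and species name begins
--     i = 0
--     while i < len(term) and term[i].isdigit():
--         i += 1
--
--     if i == 0:
--         # No coefficient, default to 1
--         # But first character must be alphabetic (valid species name start)
--         if not term[0].isalpha():
--             raise ValueError(
--                 f"Species name must start with a letter: '{term}'"
--             )
--         return (1, term)
--     elif i == len(term):
--         raise ValueError(f"Invalid term (no species name): {term}")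
--     else:
--         coeff = int(term[:i])
--         if coeff <= 0:
--             raise ValueError(f"Coefficient must be positive: '{term}'")
--         name = term[i:].strip()
--
--         # Check for scientific notation attempt: coefficient followed by e/E and digit
--         # e.g., "1e3A" would have name="e3A" which looks like sci notation
--         if name and name[0].lower() == 'e' and len(name) > 1 and name[1].isdigit():
--             raise ValueError(
--                 f"Scientific notation not supported in coefficients: '{term}'. "
--                 f"Use integer stoichiometric coefficients only."
--             )
--
--         # Species name must start with a letter
--         if not name or not name[0].isalpha():
--             raise ValueError(
--                 f"Species name must start with a letter: '{term}'"
--             )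
--         return (coeff, name)
-- ===== SOURCE B (Python) =====
-- # B: one single forward pass with a small state machine (dot-before-alpha flag,
-- # digit-run and tail built char-by-char) replacing A's staged passes
-- # (enumerate/next + substring test, index-walking while loop, slicing).
-- from typing import Optional, Tuple
--
-- def _parse_species_term(term: str) -> Optional[Tuple[int, str]]:
--     term = term.strip()
--     if not term:
--         return None
--
--     digits = []         # characters of the leading digit run
--     tail = []           # characters after the leading digit run
--     dot_bad = False     # '.' seen strictly before the first alphabetic char
--     seen_alpha = False
--     in_digits = True
--     for c in term:
--         if not seen_alpha:
--             if c.isalpha():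
--                 seen_alpha = True
--             elif c == '.':
--                 dot_bad = True
--         if in_digits and c.isdigit():
--             digits.append(c)
--         else:
--             in_digits = False
--             tail.append(c)
--
--     if dot_bad:
--         raise ValueError(
--             f"Non-integer coefficient not supported: '{term}'. "
--             f"Use integer stoichiometric coefficients only."
--         )
--     if not digits:
--         if not term[0].isalpha():
--             raise ValueError(f"Species name must start with a letter: '{term}'")
--         return (1, term)
--     if not tail:
--         raise ValueError(f"Invalid term (no species name): {term}")
--     coeff = int(''.join(digits))
--     if coeff <= 0:
--         raise ValueError(f"Coefficient must be positive: '{term}'")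
--     name = ''.join(tail).strip()
--     if name and name[0].lower() == 'e' and len(name) > 1 and name[1].isdigit():
--         raise ValueError(
--             f"Scientific notation not supported in coefficients: '{term}'. "
--             f"Use integer stoichiometric coefficients only."
--         )
--     if not name or not name[0].isalpha():
--         raise ValueError(f"Species name must start with a letter: '{term}'")
--     return (coeff, name)
-- ===== Notes on version B (the rewrite author's own statement) =====
-- stated objective: alternative
-- what changed: A's staged passes (enumerate/next for the first letter, substring '.'-membership tests, an index-walking digit while loop, slicing term[:i]/term[i:]) are replaced by one fused forward pass over the characters with a small state machine (dot-before-alpha flag, digit run and tail accumulated char-by-char), with all decisions made after the single scan.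
import Mathlib
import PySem

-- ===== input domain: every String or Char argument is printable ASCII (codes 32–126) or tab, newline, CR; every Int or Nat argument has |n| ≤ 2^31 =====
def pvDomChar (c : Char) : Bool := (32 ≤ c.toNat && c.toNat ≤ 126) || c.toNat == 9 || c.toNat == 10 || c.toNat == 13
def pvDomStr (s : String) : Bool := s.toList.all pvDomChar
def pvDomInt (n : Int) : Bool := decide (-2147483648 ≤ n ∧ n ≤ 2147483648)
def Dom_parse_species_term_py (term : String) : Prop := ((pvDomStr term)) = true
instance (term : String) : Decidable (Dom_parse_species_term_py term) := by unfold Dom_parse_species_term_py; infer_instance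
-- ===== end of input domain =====

-- B replaces A's staged passes (enumerate/next, substring '.'-tests, index-walking digit
-- loop, slicing) by one fused forward scan with a small state machine (objective: alternative; same cost).


-- ===== PORT A =====
-- while i < len(term) and term[i].isdigit(): i += 1
def aDigitSpan : List Char → Nat
  | [] => 0
  | c :: cs => if PySem.Chars.isdigit c then aDigitSpan cs + 1 else 0

def parse_species_term_py (term : String) : Option (Int × String) :=
  let t := PySem.Str.strip term
  let l := t.toList
  if l = [] then none
  else
    -- '.' in term, then first_alpha = next((i for i, c in enumerate(term) if c.isalpha()), len(term))
    -- and '.' in term[:first_alpha]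
    if PySem.Chars.isIn ['.'] l &&
       PySem.Chars.isIn ['.'] (l.take (l.findIdx (fun c => PySem.Chars.isalpha c))) then
      none                                   -- raise ValueError (non-integer coefficient)
    else
      let i := aDigitSpan l
      if i = 0 then
        if !PySem.Chars.isalpha (l.headD ' ') then none   -- raise ValueError (name start)
        else some (1, t)
      else if i = l.length then none         -- raise ValueError (no species name)
      else
        match PySem.Int.ofChars? (l.take i) with
        | none => none                       -- unreachable: int() of the nonempty digit slice
        | some coeff =>
          if coeff ≤ 0 then none             -- raise ValueError (coefficient positive)
          else
            let name := PySem.Chars.strip (l.drop i)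
            if decide (name ≠ []) && (PySem.Chars.lowerChar (name.headD ' ') == 'e')
               && decide (1 < name.length) && PySem.Chars.isdigit (name.getD 1 ' ') then
              none                           -- raise ValueError (scientific notation)
            else if decide (name = []) || !PySem.Chars.isalpha (name.headD ' ') then
              none                           -- raise ValueError (name start)
            else some (coeff, String.ofList name)

-- ===== PORT B =====
-- the loop body of Source B's single scan: state = (seen_alpha, dot_bad, digits, in_digits, tail)
def bStep (st : Bool × Bool × List Char × Bool × List Char) (c : Char) :
    Bool × Bool × List Char × Bool × List Char :=
  match st with
  | (sa, db, dg, ind, tl) =>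
    -- if not seen_alpha: if c.isalpha(): seen_alpha = True elif c == '.': dot_bad = True
    let p : Bool × Bool :=
      if !sa then
        if PySem.Chars.isalpha c then (true, db)
        else if c = '.' then (sa, true)
        else (sa, db)
      else (sa, db)
    -- if in_digits and c.isdigit(): digits.append(c) else: in_digits = False; tail.append(c)
    if ind && PySem.Chars.isdigit c then (p.1, p.2, dg ++ [c], ind, tl)
    else (p.1, p.2, dg, false, tl ++ [c])

def parse_species_term_py_alt (term : String) : Option (Int × String) :=
  let t := PySem.Str.strip term
  let l := t.toList
  if l = [] then none
  else
    match l.foldl bStep (false, false, [], true, []) with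
    | (_, dotBad, digits, _, tail) =>
      if dotBad then none                    -- raise ValueError (non-integer coefficient)
      else if digits = [] then
        if !PySem.Chars.isalpha (l.headD ' ') then none   -- raise ValueError (name start)
        else some (1, t)
      else if tail = [] then none            -- raise ValueError (no species name)
      else
        match PySem.Int.ofChars? digits with -- int(''.join(digits))
        | none => none                       -- unreachable: int() of the nonempty digit run
        | some coeff =>
          if coeff ≤ 0 then none             -- raise ValueError (coefficient positive)
          else
            let name := PySem.Chars.strip tail
            if decide (name ≠ []) && (PySem.Chars.lowerChar (name.headD ' ') == 'e')
               && decide (1 < name.length) && PySem.Chars.isdigit (name.getD 1 ' ') then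
              none                           -- raise ValueError (scientific notation)
            else if decide (name = []) || !PySem.Chars.isalpha (name.headD ' ') then
              none                           -- raise ValueError (name start)
            else some (coeff, String.ofList name)

-- ===== PRECONDITION & SPEC =====
-- Pre_ excludes exactly the inputs on which A raises ValueError: a '.' before the first
-- letter of the stripped term, an all-digit term, a non-positive coefficient, a species
-- name not starting with a letter, or a coefficient followed by e/E plus a digit.
def Pre_parse_species_term_py (term : String) : Prop :=
  let l := (PySem.Str.strip term).toList
  l = [] ∨
  ('.' ∉ l.take (l.findIdx (fun c => PySem.Chars.isalpha c)) ∧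
    (let ds := l.takeWhile (fun c => PySem.Chars.isdigit c)
     if ds.length = 0 then PySem.Chars.isalpha (l.headD ' ') = true
     else ds.length ≠ l.length ∧
       (PySem.Int.ofChars? ds).isSome = true ∧
       0 < (PySem.Int.ofChars? ds).getD 0 ∧
       (let name := PySem.Chars.strip (l.drop ds.length)
        name ≠ [] ∧ PySem.Chars.isalpha (name.headD ' ') = true ∧
        ¬ (PySem.Chars.lowerChar (name.headD ' ') = 'e' ∧ 1 < name.length ∧
           PySem.Chars.isdigit (name.getD 1 ' ') = true))))
instance (term : String) : Decidable (Pre_parse_species_term_py term) := by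
  unfold Pre_parse_species_term_py; infer_instance

def pvWitness_parse_species_term_py : String := "2H2O"

def Spec_parse_species_term_py (term : String) (out : Option (Int × String)) : Prop := out = parse_species_term_py_alt term
instance (term : String) (out : Option (Int × String)) : Decidable (Spec_parse_species_term_py term out) := by unfold Spec_parse_species_term_py; infer_instance

-- ===== CLAIM (what is proved, stated in full; the proofs are below) =====
def Claim_equal_parse_species_term_py : Prop := ∀ (term : String), Dom_parse_species_term_py term → Pre_parse_species_term_py term → Spec_parse_species_term_py term (parse_species_term_py term)

-- ===== LEMMAS AND PROOFS =====

-- the (seen_alpha, dot_bad) half of Source B's loop, run on its own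
def dotFold : List Char → Bool → Bool → Bool × Bool
  | [], sa, db => (sa, db)
  | c :: cs, sa, db =>
    if !sa then
      if PySem.Chars.isalpha c then dotFold cs true db
      else if c = '.' then dotFold cs sa true
      else dotFold cs sa db
    else dotFold cs sa db

-- the (digits, in_digits, tail) half of Source B's loop, run on its own
def digFold : List Char → List Char → Bool → List Char → List Char × Bool × List Char
  | [], dg, ind, tl => (dg, ind, tl)
  | c :: cs, dg, ind, tl =>
    if ind && PySem.Chars.isdigit c then digFold cs (dg ++ [c]) ind tl
    else digFold cs dg false (tl ++ [c])

-- the fold of bStep factors into the two independent halves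
theorem foldl_bStep_split (l : List Char) :
    ∀ (sa db : Bool) (dg : List Char) (ind : Bool) (tl : List Char),
    l.foldl bStep (sa, db, dg, ind, tl) =
      ((dotFold l sa db).1, (dotFold l sa db).2,
       (digFold l dg ind tl).1, (digFold l dg ind tl).2.1, (digFold l dg ind tl).2.2) := by
  induction l with
  | nil => intro sa db dg ind tl; simp [dotFold, digFold]
  | cons c cs ih =>
    intro sa db dg ind tl
    simp only [List.foldl_cons, bStep, dotFold, digFold]
    by_cases hsa : sa = true <;> by_cases ha : PySem.Chars.isalpha c = true <;>
      by_cases hdot : c = '.' <;> by_cases hind : ind = true <;>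
      by_cases hd : PySem.Chars.isdigit c = true <;>
      simp [hsa, ha, hdot, hind, hd, ih,
        (by decide : PySem.Chars.isdigit '.' = false),
        (by decide : PySem.Chars.isalpha '.' = false)]

theorem dotFold_sa_true (l : List Char) (db : Bool) : dotFold l true db = (true, db) := by
  induction l with
  | nil => rfl
  | cons c cs ih => simp [dotFold, ih]

theorem dotFold_db_true (l : List Char) (sa : Bool) : (dotFold l sa true).2 = true := by
  induction l generalizing sa with
  | nil => rfl
  | cons c cs ih =>
    by_cases hsa : sa = true
    · simp [dotFold, hsa, ih]
    · simp only [Bool.not_eq_true] at hsa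
      subst hsa
      by_cases ha : PySem.Chars.isalpha c = true
      · simp [dotFold, ha, dotFold_sa_true]
      · by_cases hdot : c = '.' <;>
          simp [dotFold, ha, hdot, ih, (by decide : PySem.Chars.isalpha '.' = false)]

-- Source B's dot flag fires exactly when a '.' occurs before the first letter
theorem dotFold_iff (l : List Char) :
    (dotFold l false false).2 = true ↔ '.' ∈ l.take (l.findIdx (fun c => PySem.Chars.isalpha c)) := by
  induction l with
  | nil => simp [dotFold]
  | cons c cs ih =>
    by_cases ha : PySem.Chars.isalpha c = true
    · simp [dotFold, ha, dotFold_sa_true, List.findIdx_cons]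
    · by_cases hdot : c = '.'
      · subst hdot
        simp [dotFold, ha, dotFold_db_true, List.findIdx_cons]
      · simp [dotFold, ha, hdot, List.findIdx_cons, ih, Ne.symm hdot]

-- A's index-walking digit loop never passes the end of the string.
theorem aDigitSpan_le (l : List Char) : aDigitSpan l ≤ l.length := by
  induction l with
  | nil => simp [aDigitSpan]
  | cons c cs ih => simp only [aDigitSpan, List.length_cons]; split <;> omega

-- once in_digits is false, the tail simply collects every remaining character
theorem digFold_false (l : List Char) (dg tl : List Char) :
    digFold l dg false tl = (dg, false, tl ++ l) := by
  induction l generalizing tl with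
  | nil => simp [digFold]
  | cons c cs ih => simp [digFold, ih]

-- Source B's digit/tail accumulators are A's slices at the digit-loop index
theorem digFold_spec (l : List Char) : ∀ (dg : List Char),
    digFold l dg true [] =
      (dg ++ l.take (aDigitSpan l), decide (aDigitSpan l = l.length), l.drop (aDigitSpan l)) := by
  induction l with
  | nil => intro dg; simp [digFold, aDigitSpan]
  | cons c cs ih =>
    intro dg
    by_cases hd : PySem.Chars.isdigit c = true
    · simp [digFold, hd, ih, aDigitSpan, List.take_succ_cons]
    · have h0 : ¬ ((0 : Nat) = cs.length + 1) := by omega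
      simp [digFold, hd, digFold_false, aDigitSpan]

theorem isIn_singleton (c : Char) (l : List Char) :
    PySem.Chars.isIn [c] l = decide (c ∈ l) := by
  rcases h : PySem.Chars.isIn [c] l with _ | _
  · have := (PySem.Chars.isIn_eq_false_iff _ _).1 h
    simp [List.singleton_infix_iff] at this
    simp [this]
  · have := (PySem.Chars.isIn_iff_infix _ _).1 h
    simp [List.singleton_infix_iff] at this
    simp [this]

-- A's two-part '.'-guard equals Source B's dot flag
theorem dotGuard_eq (l : List Char) :
    (PySem.Chars.isIn ['.'] l &&
     PySem.Chars.isIn ['.'] (l.take (l.findIdx (fun c => PySem.Chars.isalpha c))))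
    = (dotFold l false false).2 := by
  rcases hb : (dotFold l false false).2 with _ | _
  · have h : ¬ '.' ∈ l.take (l.findIdx (fun c => PySem.Chars.isalpha c)) :=
      fun h' => by simp [(dotFold_iff l).2 h'] at hb
    simp [isIn_singleton, h]
  · have h := (dotFold_iff l).1 hb
    simp [isIn_singleton, h, List.mem_of_mem_take h]

-- The two ports agree on every input (raise points included: both return none there).
theorem main_eq (term : String) :
    parse_species_term_py term = parse_species_term_py_alt term := by
  unfold parse_species_term_py parse_species_term_py_alt
  dsimp only
  rw [foldl_bStep_split, digFold_spec, dotGuard_eq]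
  generalize (PySem.Str.strip term) = t
  generalize ht : t.toList = l
  by_cases h0 : l = []
  · simp [h0]
  · simp only [h0, if_false]
    cases hb : (dotFold l false false).2
    · simp only [Bool.false_eq_true, if_false, List.nil_append]
      have hle := aDigitSpan_le l
      by_cases hi0 : aDigitSpan l = 0
      · simp [hi0]
      · have htk : ¬ (l.take (aDigitSpan l) = []) := by
          intro hEq
          rcases List.take_eq_nil_iff.mp hEq with h' | h'
          · exact hi0 h'
          · exact h0 h'
        rw [if_neg hi0, if_neg htk]
        by_cases hil : aDigitSpan l = l.length
        · simp [hil]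
        · have hne : ¬ (l.drop (aDigitSpan l) = []) := by
            simp [List.drop_eq_nil_iff]; omega
          rw [if_neg hil, if_neg hne]
    · simp

-- ===== VERDICT (by name: the statement is the Claim_ definition above) =====
theorem parse_species_term_py_spec : Claim_equal_parse_species_term_py := by
  unfold Claim_equal_parse_species_term_py Spec_parse_species_term_py
  exact fun term _ _ => main_eq term
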